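-- pv_equiv track=rewrite | github.com/ydb-platform/ydb | contrib/python/tracerite/tracerite/tty.py | _find_last_marked_line
-- ===== SOURCE A (Python) =====
-- def _find_last_marked_line(
--     output_lines: list[tuple[str, int, int, bool]],
--     frame_line_start: int,
--     frame_line_end: int,
-- ) -> int:
--     """Find the last marked line within the frame range.
--
--     Returns the line index of the last marked line, or frame_line_end if none are marked.
--     """
--     last_marked = frame_line_end  # Fallback to last line of frame
--
--     for li in range(frame_line_start, frame_line_end + 1):
--         _, _, _, is_marked = output_lines[li]
--         if is_marked:
--             last_marked = li
--
--     return last_marked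
-- ===== SOURCE B (Python) =====
-- def _find_last_marked_line(
--     output_lines: list[tuple[str, int, int, bool]],
--     frame_line_start: int,
--     frame_line_end: int,
-- ) -> int:
--     """Find the last marked line within the frame range.
--
--     Returns the line index of the last marked line, or frame_line_end if none are marked.
--     """
--     for li in range(frame_line_end, frame_line_start - 1, -1):
--         _, _, _, is_marked = output_lines[li]
--         if is_marked:
--             return li
--     return frame_line_end
-- ===== Notes on version B (the rewrite author's own statement) =====
-- stated objective: alternative
-- what changed: Replaces the forward accumulator scan over the whole range with a backward early-exit search that returns the first marked index found from the end (no accumulator).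
import Mathlib
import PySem

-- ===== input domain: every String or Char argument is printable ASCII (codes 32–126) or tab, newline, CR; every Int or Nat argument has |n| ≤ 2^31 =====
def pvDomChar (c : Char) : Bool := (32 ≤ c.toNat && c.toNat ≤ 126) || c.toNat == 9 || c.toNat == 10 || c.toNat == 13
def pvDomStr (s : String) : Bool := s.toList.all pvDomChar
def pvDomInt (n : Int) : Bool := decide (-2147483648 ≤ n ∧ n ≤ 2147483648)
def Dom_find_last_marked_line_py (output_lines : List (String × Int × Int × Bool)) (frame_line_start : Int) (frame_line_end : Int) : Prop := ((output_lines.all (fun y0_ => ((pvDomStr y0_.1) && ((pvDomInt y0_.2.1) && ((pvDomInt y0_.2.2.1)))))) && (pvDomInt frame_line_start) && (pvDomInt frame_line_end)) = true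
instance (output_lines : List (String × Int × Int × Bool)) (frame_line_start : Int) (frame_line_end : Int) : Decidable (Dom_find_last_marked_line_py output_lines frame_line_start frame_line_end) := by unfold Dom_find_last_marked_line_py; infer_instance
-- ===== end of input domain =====

-- B replaces A's forward scan with a last-marked accumulator by a backward early-exit
-- search (first marked index from the end, no accumulator); same cost, different decomposition.

-- ===== PORT A =====
-- forward loop: for li in range(frame_line_start, frame_line_end + 1): keep last marked index
def find_last_marked_line_py (output_lines : List (String × Int × Int × Bool)) (frame_line_start : Int) (frame_line_end : Int) : Int :=
  (PySem.List.pyRange frame_line_start (frame_line_end + 1) 1).foldl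
    (fun last_marked li =>
      match PySem.List.pyGet? output_lines li with
      | some (_, _, _, is_marked) => if is_marked then li else last_marked
      | none => last_marked)   -- IndexError in Python; excluded by Pre_
    frame_line_end

-- ===== PORT B =====
-- backward loop with early return: first marked index scanning from the end
def findFromEnd (output_lines : List (String × Int × Int × Bool)) : List Int → Int → Int
  | [], fallback => fallback
  | li :: rest, fallback =>
    match PySem.List.pyGet? output_lines li with
    | some (_, _, _, is_marked) =>
        if is_marked then li else findFromEnd output_lines rest fallback
    | none => findFromEnd output_lines rest fallback   -- IndexError in Python; excluded by Pre_

def find_last_marked_line_py_alt (output_lines : List (String × Int × Int × Bool)) (frame_line_start : Int) (frame_line_end : Int) : Int :=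
  findFromEnd output_lines
    (PySem.List.pyRange frame_line_end (frame_line_start - 1) (-1))
    frame_line_end

-- ===== PRECONDITION & SPEC =====
-- Pre_ excludes exactly the inputs on which Python A raises IndexError: a nonempty
-- range [start, end] containing an index outside [-len, len).
def Pre_find_last_marked_line_py (output_lines : List (String × Int × Int × Bool)) (frame_line_start : Int) (frame_line_end : Int) : Prop :=
  frame_line_start ≤ frame_line_end →
    (-(output_lines.length : Int) ≤ frame_line_start ∧ frame_line_end < output_lines.length)
instance (output_lines : List (String × Int × Int × Bool)) (frame_line_start : Int) (frame_line_end : Int) : Decidable (Pre_find_last_marked_line_py output_lines frame_line_start frame_line_end) := by unfold Pre_find_last_marked_line_py; infer_instance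

def pvWitness_find_last_marked_line_py : (List (String × Int × Int × Bool)) × Int × Int :=
  ([("a", 1, 1, false), ("b", 2, 2, true), ("c", 3, 3, false)], 0, 2)

def Spec_find_last_marked_line_py (output_lines : List (String × Int × Int × Bool)) (frame_line_start : Int) (frame_line_end : Int) (out : Int) : Prop := out = find_last_marked_line_py_alt output_lines frame_line_start frame_line_end
instance (output_lines : List (String × Int × Int × Bool)) (frame_line_start : Int) (frame_line_end : Int) (out : Int) : Decidable (Spec_find_last_marked_line_py output_lines frame_line_start frame_line_end out) := by unfold Spec_find_last_marked_line_py; infer_instance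

-- ===== CLAIM (what is proved, stated in full; the proofs are below) =====
def Claim_equal_find_last_marked_line_py : Prop := ∀ (output_lines : List (String × Int × Int × Bool)) (frame_line_start : Int) (frame_line_end : Int), Dom_find_last_marked_line_py output_lines frame_line_start frame_line_end → Pre_find_last_marked_line_py output_lines frame_line_start frame_line_end → Spec_find_last_marked_line_py output_lines frame_line_start frame_line_end (find_last_marked_line_py output_lines frame_line_start frame_line_end)

-- ===== LEMMAS AND PROOFS =====

-- A's fold step over one index
def stepA (output_lines : List (String × Int × Int × Bool)) (last_marked li : Int) : Int :=
  match PySem.List.pyGet? output_lines li with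
  | some (_, _, _, is_marked) => if is_marked then li else last_marked
  | none => last_marked

theorem findFromEnd_append_singleton (ol : List (String × Int × Int × Bool))
    (L : List Int) (x e : Int) :
    findFromEnd ol (L ++ [x]) e = findFromEnd ol L (stepA ol e x) := by
  induction L with
  | nil =>
    simp only [List.nil_append, findFromEnd, stepA]
  | cons y ys ih =>
    simp only [List.cons_append, findFromEnd]
    rcases h : PySem.List.pyGet? ol y with _ | ⟨_, _, _, m⟩ <;> simp [ih]

theorem foldl_eq_findFromEnd_reverse (ol : List (String × Int × Int × Bool))
    (L : List Int) (e : Int) :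
    L.foldl (stepA ol) e = findFromEnd ol L.reverse e := by
  induction L generalizing e with
  | nil => rfl
  | cons x xs ih =>
    simp only [List.foldl_cons, List.reverse_cons, ih,
      findFromEnd_append_singleton]

-- ===== VERDICT (by name: the statement is the Claim_ definition above) =====
theorem find_last_marked_line_py_spec : Claim_equal_find_last_marked_line_py := by
  intro ol s e _ _
  show find_last_marked_line_py ol s e = find_last_marked_line_py_alt ol s e
  unfold find_last_marked_line_py find_last_marked_line_py_alt
  have hr : PySem.List.pyRange e (s - 1) (-1)
      = (PySem.List.pyRange s (e + 1) 1).reverse := by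
    rw [PySem.List.pyRange_neg_one_eq_reverse]
    norm_num
  rw [hr, ← foldl_eq_findFromEnd_reverse]
  rfl
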